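-- pv_equiv track=rewrite | github.com/celinehocquette/magicpopper | ilp-experiments/ilpexp/problem/list_append/list.py | generate_constant_set
-- ===== SOURCE A (Python) =====
-- import itertools
--
-- def generate_constant_set(n_constants):
--
--     chr_set = [chr(i) for i in range(97, 123)]
--
--     length = 1
--     constant_set = []
--     while n_constants > 0:
--         new_c = ["".join(x) for x in list(itertools.product(chr_set, repeat=length)) if
--                  "".join(x) != "magic_val" and "".join(x) != "nl"]
--         constant_set += new_c[:min(n_constants, len(new_c))]
--         n_constants -= len(new_c)
--         length += 1
--
--     return constant_set
-- ===== SOURCE B (Python) =====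
-- def generate_constant_set(n_constants):
--     # Rank-based decoding: the i-th lowercase word in shortlex order is computed
--     # arithmetically (find its length, then read off base-26 digits); among the
--     # first k+2 words at most two are the reserved "magic_val"/"nl", so filtering
--     # k+2 candidates and truncating to k yields the answer.
--     def word(i):
--         length = 1
--         count = 26
--         while i >= count:
--             i -= count
--             length += 1
--             count *= 26
--         chars = []
--         for _ in range(length):
--             chars.append(chr(97 + i % 26))
--             i //= 26
--         return "".join(reversed(chars))
--
--     k = max(n_constants, 0)
--     candidates = [word(i) for i in range(k + 2)]
--     result = [s for s in candidates if s != "magic_val" and s != "nl"]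
--     return result[:k]
-- ===== Notes on version B (the rewrite author's own statement) =====
-- stated objective: alternative
-- what changed: B computes the i-th shortlex word directly by arithmetic rank decoding (locate the length bucket by subtracting powers of 26, then read off base-26 digits), decodes just k+2 candidates, filters out the two reserved words and truncates to k, instead of materializing and joining entire cartesian-product levels per length.
import Mathlib
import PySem

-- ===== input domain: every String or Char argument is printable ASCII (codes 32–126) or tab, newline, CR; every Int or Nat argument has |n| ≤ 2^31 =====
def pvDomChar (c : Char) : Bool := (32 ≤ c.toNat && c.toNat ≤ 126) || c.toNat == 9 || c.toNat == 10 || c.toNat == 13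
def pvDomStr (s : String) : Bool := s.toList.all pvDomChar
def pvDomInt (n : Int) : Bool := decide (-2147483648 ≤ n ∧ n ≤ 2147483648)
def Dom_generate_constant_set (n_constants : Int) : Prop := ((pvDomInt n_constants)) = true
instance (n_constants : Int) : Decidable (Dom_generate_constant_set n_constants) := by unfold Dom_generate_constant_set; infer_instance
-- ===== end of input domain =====

-- B replaces A's per-length cartesian-product materialization by arithmetic rank
-- decoding: the i-th shortlex word is computed from i by base-26 digit extraction,
-- k+2 candidates are decoded, the ≤2 reserved words filtered out, and the list cut to k.

-- ===== PORT A =====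
-- chr_set = [chr(i) for i in range(97, 123)]
def pvChrSet : List String := (PySem.List.pyRange 97 123 1).map (fun i => String.ofList [Char.ofNat i.toNat])

-- itertools.product(pool, repeat=n)
def pvProduct (pool : List String) : Nat → List (List String)
  | 0 => [[]]
  | n + 1 => pool.flatMap (fun c => (pvProduct pool n).map (fun t => c :: t))

-- new_c = ["".join(x) for x in list(itertools.product(chr_set, repeat=length)) if "".join(x) != "magic_val" and "".join(x) != "nl"]
def pvNewC (length : Nat) : List String :=
  ((pvProduct pvChrSet length).filter
      (fun x => !(PySem.Str.join "" x == "magic_val") && !(PySem.Str.join "" x == "nl"))).map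
    (fun x => PySem.Str.join "" x)

-- each length contributes at least the all-'a' word, so new_c is never empty (termination of A's loop)
theorem pvNewC_ne_nil (length : Nat) : pvNewC length ≠ [] := by
  have hmem : List.replicate length "a" ∈ pvProduct pvChrSet length := by
    induction length with
    | zero => simp [pvProduct]
    | succ n ih =>
      simp only [pvProduct, List.mem_flatMap]
      exact ⟨"a", by decide, List.mem_map.2 ⟨_, ih, rfl⟩⟩
  have hjoin : (PySem.Str.join "" (List.replicate length "a")).toList = List.replicate length 'a' := by
    have h1 := PySem.Str.toList_join "" (List.replicate length "a")
    have h2 : ("" : String).toList = [] := rfl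
    have h3 : List.map String.toList (List.replicate length "a")
        = (List.replicate length 'a').map (fun c => [c]) := by
      simp [List.map_replicate]
    rw [h1, h2, h3, PySem.Chars.join_nil_singletons]
  have hm : ¬ (PySem.Str.join "" (List.replicate length "a") == "magic_val") = true := by
    simp only [beq_iff_eq]
    intro h
    have h2 : List.replicate length 'a' = "magic_val".toList := by rw [← hjoin, h]
    have hl : length = 9 := by
      have := congrArg List.length h2; simpa using this
    subst hl; exact absurd h2 (by decide)
  have hn : ¬ (PySem.Str.join "" (List.replicate length "a") == "nl") = true := by
    simp only [beq_iff_eq]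
    intro h
    have h2 : List.replicate length 'a' = "nl".toList := by rw [← hjoin, h]
    have hl : length = 2 := by
      have := congrArg List.length h2; simpa using this
    subst hl; exact absurd h2 (by decide)
  intro hnil
  have : List.replicate length "a" ∈ (pvProduct pvChrSet length).filter
      (fun x => !(PySem.Str.join "" x == "magic_val") && !(PySem.Str.join "" x == "nl")) := by
    refine List.mem_filter.2 ⟨hmem, ?_⟩
    simp only [Bool.and_eq_true, Bool.not_eq_true']
    exact ⟨by simpa using hm, by simpa using hn⟩
  have : pvNewC length ≠ [] := by
    unfold pvNewC
    simp only [ne_eq, List.map_eq_nil_iff]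
    intro hfe; rw [hfe] at this; exact absurd this (List.not_mem_nil)
  exact this hnil

-- the while loop of A
def pvALoop (n_constants : Int) (length : Nat) (constant_set : List String) : List String :=
  if n_constants > 0 then
    let new_c := pvNewC length
    pvALoop (n_constants - new_c.length) (length + 1)
      (constant_set ++ PySem.List.slice new_c none (some (min n_constants (new_c.length : Int))))
  else constant_set
termination_by n_constants.toNat
decreasing_by
  have h1 : 0 < (pvNewC length).length := List.length_pos_of_ne_nil (pvNewC_ne_nil length)
  omega

def generate_constant_set (n_constants : Int) : List String := pvALoop n_constants 1 []

-- ===== PORT B =====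
-- the while-loop of word(i): find the length bucket i falls in
def pvFindLen (i : Nat) (length : Nat) (count : Nat) : Nat × Nat :=
  if h : count ≤ i ∧ 0 < count then pvFindLen (i - count) (length + 1) (count * 26)
  else (i, length)
termination_by i
decreasing_by omega

-- the for-loop of word(i): base-26 digits, least significant first
def pvDigitsList : Nat → Nat → List String
  | 0, _ => []
  | l + 1, r => String.ofList [Char.ofNat (97 + r % 26)] :: pvDigitsList l (r / 26)

-- word(i) = "".join(reversed(chars))
def pvWord (i : Nat) : String :=
  let p := pvFindLen i 1 26
  PySem.Str.join "" (pvDigitsList p.2 p.1).reverse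

def generate_constant_set_alt (n_constants : Int) : List String :=
  let k := max n_constants 0
  let candidates := (PySem.List.pyRange 0 (k + 2) 1).map (fun i => pvWord i.toNat)
  let result := candidates.filter (fun s => !(s == "magic_val") && !(s == "nl"))
  PySem.List.slice result none (some k)

-- ===== PRECONDITION & SPEC =====
def Spec_generate_constant_set (n_constants : Int) (out : List String) : Prop := out = generate_constant_set_alt n_constants
instance (n_constants : Int) (out : List String) : Decidable (Spec_generate_constant_set n_constants out) := by unfold Spec_generate_constant_set; infer_instance

-- ===== CLAIM (what is proved, stated in full; the proofs are below) =====
def Claim_equal_generate_constant_set : Prop := ∀ (n_constants : Int), Dom_generate_constant_set n_constants → Spec_generate_constant_set n_constants (generate_constant_set n_constants)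

-- ===== LEMMAS AND PROOFS =====

-- abbreviations for the shared filter predicates
def pvGood (s : String) : Bool := !(s == "magic_val") && !(s == "nl")
def pvBad (s : String) : Bool := (s == "magic_val") || (s == "nl")

-- all words of one length, in product (shortlex-within-length) order
def pvLevel (l : Nat) : List String := (pvProduct pvChrSet l).map (fun x => PySem.Str.join "" x)

-- all words of lengths l, l+1, …, l+L-1
def pvFWr (l : Nat) : Nat → List String
  | 0 => []
  | L + 1 => pvLevel l ++ pvFWr (l + 1) L

-- number of words of lengths l … l+L-1
def pvS (l : Nat) : Nat → Nat
  | 0 => 0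
  | L + 1 => 26 ^ l + pvS (l + 1) L

theorem pvChrSet_eq : pvChrSet = (List.range 26).map (fun j => String.ofList [Char.ofNat (97 + j)]) := by decide

theorem pvJoin_nil_flatten (l : List (List Char)) : PySem.Chars.join [] l = l.flatten := by
  induction l with
  | nil => rfl
  | cons x xs ih =>
    cases xs with
    | nil => simp [PySem.Chars.join, List.intercalate, List.intersperse]
    | cons y ys =>
      simp [PySem.Chars.join, List.intercalate, List.intersperse] at ih ⊢
      simpa using ih

theorem pvToList_join (x : List String) :
    (PySem.Str.join "" x).toList = (x.map String.toList).flatten := by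
  rw [PySem.Str.toList_join]
  exact pvJoin_nil_flatten _

-- reconstruction: a list of one-character strings is recovered from its join
theorem pvRecon (x : List String) (h : ∀ s ∈ x, s.toList.length = 1) :
    ((PySem.Str.join "" x).toList).map (fun c => String.ofList [c]) = x := by
  induction x with
  | nil => simp
  | cons s xs ih =>
    have hs : s.toList.length = 1 := h s (by simp)
    obtain ⟨c, hc⟩ : ∃ c, s.toList = [c] := by
      cases hsl : s.toList with
      | nil => rw [hsl] at hs; simp at hs
      | cons a t =>
        rw [hsl] at hs; simp at hs
        exact ⟨a, by simp [hs]⟩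
    rw [pvToList_join] at ih ⊢
    simp only [List.map_cons, List.flatten_cons, List.map_append, hc]
    have : String.ofList [c] = s := by rw [← hc]; exact String.ofList_toList
    simp only [List.map_nil, this]
    rw [ih (fun t ht => h t (by simp [ht]))]
    simp

theorem pvJoin_len (x : List String) (h : ∀ s ∈ x, s.toList.length = 1) :
    (PySem.Str.join "" x).toList.length = x.length := by
  have := congrArg List.length (pvRecon x h)
  simpa using this

theorem pvMem_product (pool : List String) (n : Nat) (x : List String)
    (hx : x ∈ pvProduct pool n) : x.length = n ∧ ∀ s ∈ x, s ∈ pool := by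
  induction n generalizing x with
  | zero => simp [pvProduct] at hx; subst hx; simp
  | succ m ih =>
    simp only [pvProduct, List.mem_flatMap, List.mem_map] at hx
    obtain ⟨c, hc, t, ht, rfl⟩ := hx
    obtain ⟨hl, hm⟩ := ih t ht
    refine ⟨by simp [hl], ?_⟩
    intro s hs
    rcases List.mem_cons.1 hs with rfl | hs
    · exact hc
    · exact hm s hs

theorem pvChrSet_len1 : ∀ s ∈ pvChrSet, s.toList.length = 1 := by decide

-- itertools.product can also be peeled at the last coordinate
theorem pvProduct_succ_right (pool : List String) (n : Nat) :
    pvProduct pool (n + 1) = (pvProduct pool n).flatMap (fun t => pool.map (fun c => t ++ [c])) := by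
  induction n with
  | zero =>
    show pool.flatMap (fun c => [[]].map (fun t => c :: t)) = [[]].flatMap (fun t => pool.map (fun c => t ++ [c]))
    induction pool with
    | nil => rfl
    | cons p ps ihp => simpa using ihp
  | succ m ih =>
    conv_lhs => rw [show pvProduct pool (m + 1 + 1) = pool.flatMap (fun c => (pvProduct pool (m + 1)).map (fun t => c :: t)) from rfl, ih]
    conv_rhs => rw [show pvProduct pool (m + 1) = pool.flatMap (fun c => (pvProduct pool m).map (fun t => c :: t)) from rfl]
    simp only [List.map_flatMap, List.flatMap_map, List.flatMap_assoc, List.map_map, Function.comp_def, List.cons_append]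

theorem pvRange_mul (a : Nat) :
    List.range (a * 26) = (List.range a).flatMap (fun q => (List.range 26).map (fun j => 26 * q + j)) := by
  induction a with
  | zero => simp
  | succ m ih =>
    have h1 : (m + 1) * 26 = m * 26 + 26 := by ring
    rw [h1, List.range_add, ih]
    conv_rhs => rw [List.range_succ (n := m)]
    rw [List.flatMap_append]
    congr 1
    simp only [List.flatMap_cons, List.flatMap_nil, List.append_nil]
    exact List.map_congr_left (fun j _ => by ring)

-- the digit decoding enumerates exactly one product level
theorem pvDecode_level (l : Nat) :
    (List.range (26 ^ l)).map (fun r => (pvDigitsList l r).reverse) = pvProduct pvChrSet l := by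
  induction l with
  | zero => simp [pvDigitsList, pvProduct]
  | succ m ih =>
    rw [pow_succ, pvRange_mul, List.map_flatMap, pvProduct_succ_right, ← ih, List.flatMap_map]
    rw [pvChrSet_eq, List.flatMap_def, List.flatMap_def]
    congr 1
    apply List.map_congr_left
    intro q hq
    simp only [Function.comp_def, List.map_map]
    apply List.map_congr_left
    intro j hj
    have hj26 : j < 26 := List.mem_range.1 hj
    have hmod : (26 * q + j) % 26 = j := by omega
    have hdiv : (26 * q + j) / 26 = q := by omega
    show (pvDigitsList (m + 1) (26 * q + j)).reverse = _
    simp [pvDigitsList, hmod, hdiv]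

theorem pvDecode_level_str (l : Nat) :
    (List.range (26 ^ l)).map (fun r => PySem.Str.join "" (pvDigitsList l r).reverse) = pvLevel l := by
  rw [pvLevel, ← pvDecode_level, List.map_map]
  rfl

theorem pvS_succ (L : Nat) : ∀ l, pvS l (L + 1) = pvS l L + 26 ^ (l + L) := by
  induction L with
  | zero => intro l; simp [pvS]
  | succ M ih =>
    intro l
    show 26 ^ l + pvS (l + 1) (M + 1) = (26 ^ l + pvS (l + 1) M) + 26 ^ (l + (M + 1))
    rw [ih (l + 1)]
    have : l + 1 + M = l + (M + 1) := by omega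
    rw [this]; omega

theorem pvS_ge (L : Nat) : ∀ l, L ≤ pvS l L := by
  induction L with
  | zero => intro l; omega
  | succ M ih =>
    intro l
    have h1 : 0 < 26 ^ l := Nat.pow_pos (by norm_num : (0:Nat) < 26) (n := l)
    have := ih (l + 1)
    show M + 1 ≤ 26 ^ l + pvS (l + 1) M
    omega

theorem pvFindLen_eq (L : Nat) : ∀ l r, r < 26 ^ (l + L) →
    pvFindLen (pvS l L + r) l (26 ^ l) = (r, l + L) := by
  induction L with
  | zero =>
    intro l r hr
    have hr' : r < 26 ^ l := by simpa using hr
    rw [pvFindLen, dif_neg]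
    · simp [pvS]
    · simp only [pvS, Nat.zero_add]
      intro h
      omega
  | succ M ih =>
    intro l r hr
    rw [pvFindLen, dif_pos]
    · have h1 : pvS l (M + 1) + r - 26 ^ l = pvS (l + 1) M + r := by
        show 26 ^ l + pvS (l + 1) M + r - 26 ^ l = _
        omega
      have h2 : 26 ^ l * 26 = 26 ^ (l + 1) := (pow_succ 26 l).symm
      rw [h1, h2]
      have hr' : r < 26 ^ ((l + 1) + M) := by
        have : (l + 1) + M = l + (M + 1) := by omega
        rw [this]; exact hr
      have := ih (l + 1) r hr'
      rw [this]
      have : (l + 1) + M = l + (M + 1) := by omega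
      rw [this]
    · constructor
      · show 26 ^ l ≤ pvS l (M + 1) + r
        show 26 ^ l ≤ 26 ^ l + pvS (l + 1) M + r
        omega
      · exact Nat.pow_pos (by norm_num : (0:Nat) < 26) (n := l)

theorem pvWord_eq (L r : Nat) (hr : r < 26 ^ (1 + L)) :
    pvWord (pvS 1 L + r) = PySem.Str.join "" (pvDigitsList (1 + L) r).reverse := by
  unfold pvWord
  have h26 : (26 : Nat) = 26 ^ 1 := by norm_num
  rw [h26, pvFindLen_eq L 1 r hr]

theorem pvFWr_succ (L : Nat) : ∀ l, pvFWr l (L + 1) = pvFWr l L ++ pvLevel (l + L) := by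
  induction L with
  | zero => intro l; simp [pvFWr]
  | succ M ih =>
    intro l
    show pvLevel l ++ pvFWr (l + 1) (M + 1) = (pvLevel l ++ pvFWr (l + 1) M) ++ pvLevel (l + (M + 1))
    rw [ih (l + 1), List.append_assoc]
    have : l + 1 + M = l + (M + 1) := by omega
    rw [this]

-- the decoder enumerates all words of lengths 1..L in A's order
theorem pvMain (L : Nat) : (List.range (pvS 1 L)).map pvWord = pvFWr 1 L := by
  induction L with
  | zero => simp [pvS, pvFWr]
  | succ M ih =>
    rw [pvS_succ M 1, List.range_add, List.map_append, ih, List.map_map]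
    rw [pvFWr_succ M 1]
    congr 1
    rw [← pvDecode_level_str (1 + M)]
    apply List.map_congr_left
    intro r hr
    exact pvWord_eq M r (List.mem_range.1 hr)

-- A's per-level comprehension is the good-filter of the level
theorem pvNewC_eq (l : Nat) : pvNewC l = (pvLevel l).filter pvGood := by
  rw [pvLevel, List.filter_map]
  rfl

-- Nodup of one level
theorem pvProduct_nodup (l : Nat) : (pvProduct pvChrSet l).Nodup := by
  induction l with
  | zero => simp [pvProduct]
  | succ m ih =>
    show (pvChrSet.flatMap (fun c => (pvProduct pvChrSet m).map (fun t => c :: t))).Nodup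
    rw [List.nodup_flatMap]
    constructor
    · intro c _
      exact ih.map (fun t t' h => by injection h)
    · have hnd : pvChrSet.Nodup := by decide
      refine hnd.imp ?_
      intro c c' hne a ha ha'
      simp only [List.mem_map] at ha ha'
      obtain ⟨t, _, rfl⟩ := ha
      obtain ⟨t', _, h⟩ := ha'
      injection h with h1 _
      exact hne h1.symm

theorem pvLevel_nodup (l : Nat) : (pvLevel l).Nodup := by
  apply (pvProduct_nodup l).map_on
  intro x hx y hy hxy
  have hx1 : ∀ s ∈ x, s.toList.length = 1 := fun s hs =>
    pvChrSet_len1 s ((pvMem_product _ _ _ hx).2 s hs)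
  have hy1 : ∀ s ∈ y, s.toList.length = 1 := fun s hs =>
    pvChrSet_len1 s ((pvMem_product _ _ _ hy).2 s hs)
  rw [← pvRecon x hx1, ← pvRecon y hy1, hxy]

theorem pvMem_level_len (l : Nat) (s : String) (hs : s ∈ pvLevel l) : s.toList.length = l := by
  simp only [pvLevel, List.mem_map] at hs
  obtain ⟨x, hx, rfl⟩ := hs
  obtain ⟨hlen, hmem⟩ := pvMem_product _ _ _ hx
  rw [pvJoin_len x (fun t ht => pvChrSet_len1 t (hmem t ht)), hlen]

theorem pvMem_pvFWr (L : Nat) : ∀ l s, s ∈ pvFWr l L → l ≤ s.toList.length := by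
  induction L with
  | zero => intro l s hs; simp [pvFWr] at hs
  | succ M ih =>
    intro l s hs
    rcases List.mem_append.1 hs with h | h
    · rw [pvMem_level_len l s h]
    · have := ih (l + 1) s h
      omega

theorem pvCount_pvFWr (L : Nat) : ∀ l s, (pvFWr l L).count s ≤ 1 := by
  induction L with
  | zero => intro l s; simp [pvFWr]
  | succ M ih =>
    intro l s
    show ((pvLevel l ++ pvFWr (l + 1) M).count s) ≤ 1
    rw [List.count_append]
    by_cases hl : s.toList.length = l
    · have h2 : (pvFWr (l + 1) M).count s = 0 := by
        rw [List.count_eq_zero]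
        intro hmem
        have := pvMem_pvFWr M (l + 1) s hmem
        omega
      have h1 : (pvLevel l).count s ≤ 1 := List.nodup_iff_count_le_one.1 (pvLevel_nodup l) s
      omega
    · have h1 : (pvLevel l).count s = 0 := by
        rw [List.count_eq_zero]
        intro hmem
        exact hl (pvMem_level_len l s hmem)
      have := ih (l + 1) s
      omega

theorem pvCountP_bad_le (xs : List String) :
    xs.countP pvBad ≤ xs.count "magic_val" + xs.count "nl" := by
  induction xs with
  | nil => simp
  | cons x t ih =>
    by_cases hb : pvBad x = true
    · have hx : x = "magic_val" ∨ x = "nl" := by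
        simpa only [pvBad, Bool.or_eq_true, beq_iff_eq] using hb
      rcases hx with rfl | rfl <;>
        simp only [List.countP_cons, List.count_cons, hb, if_true, beq_self_eq_true] <;>
        split_ifs <;> omega
    · rw [Bool.not_eq_true] at hb
      have hx : x ≠ "magic_val" ∧ x ≠ "nl" := by
        have := hb
        simp only [pvBad, Bool.or_eq_false_iff, beq_eq_false_iff_ne, ne_eq] at this
        exact this
      simp only [List.countP_cons, List.count_cons, hb, if_false, Bool.false_eq_true,
        beq_iff_eq, hx.1]
      omega

theorem pvCountP_not (xs : List String) :
    xs.countP (fun s => !pvBad s) + xs.countP pvBad = xs.length := by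
  induction xs with
  | nil => simp
  | cons x t ih =>
    rw [List.countP_cons, List.countP_cons]
    by_cases hb : pvBad x = true <;> simp [hb] <;> omega

theorem pvGood_eq_not_bad (s : String) : pvGood s = !pvBad s := by
  simp [pvGood, pvBad]

theorem pvFilter_good_len (xs : List String) :
    (xs.filter pvGood).length = xs.length - xs.countP pvBad := by
  have h1 : xs.filter pvGood = xs.filter (fun s => !pvBad s) := by
    apply List.filter_congr
    intro s _
    exact pvGood_eq_not_bad s
  rw [h1, ← List.countP_eq_length_filter]
  have := pvCountP_not xs
  omega

-- A's loop equals: append the first n good words of levels l..l+L-1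
theorem pvALoop_eq (k : Nat) : ∀ (n : Int) (l L : Nat) (acc : List String),
    n.toNat = k → n.toNat ≤ ((pvFWr l L).filter pvGood).length →
    pvALoop n l acc = acc ++ ((pvFWr l L).filter pvGood).take n.toNat := by
  induction k using Nat.strong_induction_on with
  | _ k ih =>
    intro n l L acc hk hle
    by_cases hpos : n > 0
    · have hm : 0 < n.toNat := by omega
      cases L with
      | zero => simp [pvFWr] at hle; omega
      | succ M =>
        have hsplit : pvFWr l (M + 1) = pvLevel l ++ pvFWr (l + 1) M := rfl
        rw [hsplit, List.filter_append] at hle ⊢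
        rw [pvALoop, if_pos hpos]
        simp only [pvNewC_eq l]
        set X := (pvLevel l).filter pvGood with hX
        set R := (pvFWr (l + 1) M).filter pvGood with hR
        have hXpos : 0 < X.length := by
          rw [hX, ← pvNewC_eq l]
          exact List.length_pos_of_ne_nil (pvNewC_ne_nil l)
        have hslice : PySem.List.slice X none (some (min n (X.length : Int)))
            = X.take (min n.toNat X.length) := by
          rw [PySem.List.slice_to _ (by omega)]
          congr 1
          omega
        rw [hslice]
        rw [List.length_append] at hle
        by_cases hcase : n.toNat ≤ X.length
        · have hmin : min n.toNat X.length = n.toNat := by omega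
          rw [hmin]
          have hstop : pvALoop (n - (X.length : Int)) (l + 1)
              (acc ++ X.take n.toNat) = acc ++ X.take n.toNat := by
            rw [pvALoop, if_neg]
            omega
          rw [hstop, List.take_append_of_le_length hcase]
        · have hmin : min n.toNat X.length = X.length := by omega
          rw [hmin, List.take_length]
          have hk' : (n - (X.length : Int)).toNat = n.toNat - X.length := by omega
          have hrec := ih ((n - (X.length : Int)).toNat) (by omega)
            (n - (X.length : Int)) (l + 1) M (acc ++ X) rfl
            (by rw [hk', ← hR]; omega)
          rw [hrec, hk', ← hR]
          rw [show List.take n.toNat (X ++ R) = X ++ List.take (n.toNat - X.length) R from by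
            rw [List.take_append, List.take_of_length_le (by omega)]]
          rw [List.append_assoc]
    · rw [pvALoop, if_neg hpos]
      have h0 : n.toNat = 0 := by omega
      rw [h0]
      simp

-- the length of the full word list of lengths 1..L
theorem pvFWr_length (L : Nat) : (pvFWr 1 L).length = pvS 1 L := by
  have := congrArg List.length (pvMain L)
  simpa using this.symm

-- ===== VERDICT (by name: the statement is the Claim_ definition above) =====
theorem generate_constant_set_spec : Claim_equal_generate_constant_set := by
  intro n _
  unfold Spec_generate_constant_set generate_constant_set generate_constant_set_alt
  set m := n.toNat with hm
  set L := m + 2 with hL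
  set W := pvFWr 1 L with hW
  have hT : m + 2 ≤ pvS 1 L := hL ▸ pvS_ge L 1
  have hWlen : W.length = pvS 1 L := pvFWr_length L
  -- the prefix of the first m+2 words
  have hP2len : (W.take (m + 2)).length = m + 2 := by
    rw [List.length_take]
    omega
  have hbadW : W.countP pvBad ≤ 2 := by
    have h1 := pvCountP_bad_le W
    have h2 := pvCount_pvFWr L 1 "magic_val"
    have h3 := pvCount_pvFWr L 1 "nl"
    rw [← hW] at h2 h3
    omega
  have hbadP2 : (W.take (m + 2)).countP pvBad ≤ 2 :=
    le_trans ((List.take_sublist _ _).countP_le) hbadW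
  have hfl2 : m ≤ ((W.take (m + 2)).filter pvGood).length := by
    rw [pvFilter_good_len, hP2len]
    omega
  have hfl : m ≤ (W.filter pvGood).length := by
    conv_rhs => rw [← List.take_append_drop (m + 2) W]
    rw [List.filter_append, List.length_append]
    omega
  -- A's side
  have hA : pvALoop n 1 [] = (W.filter pvGood).take m :=
    by simpa using pvALoop_eq m n 1 L [] rfl hfl
  -- B's side: the candidates are the first m+2 decoded words
  have hk : max n 0 = (m : Int) := by omega
  have hcand : (PySem.List.pyRange 0 ((m : Int) + 2) 1).map (fun i => pvWord i.toNat)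
      = W.take (m + 2) := by
    rw [PySem.List.pyRange_one, List.map_map]
    have h2 : (((m : Int) + 2) - 0).toNat = m + 2 := by omega
    rw [h2]
    have h3 : (List.range (m + 2)).map ((fun i => pvWord i.toNat) ∘ (fun k : Nat => (0 : Int) + k))
        = (List.range (m + 2)).map pvWord := by
      apply List.map_congr_left
      intro j _
      simp
    rw [h3]
    have h4 : List.range (m + 2) = (List.range (pvS 1 L)).take (m + 2) := by
      rw [List.take_range]
      congr 1
      omega
    rw [h4, List.map_take, pvMain]
  rw [hk]
  show pvALoop n 1 [] =
    PySem.List.slice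
      (((PySem.List.pyRange 0 ((m : Int) + 2) 1).map (fun i => pvWord i.toNat)).filter pvGood)
      none (some (m : Int))
  rw [hcand]
  rw [PySem.List.slice_to _ (by omega : (0:Int) ≤ (m : Int))]
  have h5 : ((m : Int)).toNat = m := by omega
  rw [h5, hA]
  conv_lhs => rw [← List.take_append_drop (m + 2) W]
  rw [List.filter_append, List.take_append_of_le_length hfl2]
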